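-- pv_equiv track=rewrite | github.com/maati01/ASD | part2/cwiczenia6/zad7.1.py | sticking
-- ===== SOURCE A (Python) =====
-- def sticking(T, a, b):
--     n = len(T)
--     last = None
--     F = [[0]*(b - a + 1) for _ in range(n)]
--     T.sort(key=lambda x: x[0])
--
--     for i in range(n):
--         if T[i][0] == a:
--             F[i][T[i][1] - T[i][0]] = 1
--             last = i
--
--     if last is None:
--         return False
--
--     for i in range(last,n):
--         for j in range(b - a + 1):
--             for k in range(i):
--                 if a + j == T[i][1]:
--                     F[i][j] = F[i][j] or F[k][j - (T[i][1] - T[i][0])]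
--
--
--     for i in range(n):
--         if F[i][b - a]:
--             return True
--
--     return False
-- ===== SOURCE B (Python) =====
-- def sticking(T, a, b):
--     # same in-place sort side effect as A
--     T.sort(key=lambda x: x[0])
--     reached = set()
--     for s, e in T:
--         if (s == a or s in reached) and a <= e <= b:
--             reached.add(e)
--     return b in reached
-- ===== Notes on version B (the rewrite author's own statement) =====
-- stated objective: faster
-- what changed: Replaces A's O(n^2*(b-a)) dynamic programming over an n x (b-a+1) matrix with triple nested loops by a single pass over the sorted intervals that maintains the set of endpoints reachable from a.
-- outside the precondition, e.g. on sticking([(0, -1)], 0, 2): A returns True, B returns False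
import Mathlib
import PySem

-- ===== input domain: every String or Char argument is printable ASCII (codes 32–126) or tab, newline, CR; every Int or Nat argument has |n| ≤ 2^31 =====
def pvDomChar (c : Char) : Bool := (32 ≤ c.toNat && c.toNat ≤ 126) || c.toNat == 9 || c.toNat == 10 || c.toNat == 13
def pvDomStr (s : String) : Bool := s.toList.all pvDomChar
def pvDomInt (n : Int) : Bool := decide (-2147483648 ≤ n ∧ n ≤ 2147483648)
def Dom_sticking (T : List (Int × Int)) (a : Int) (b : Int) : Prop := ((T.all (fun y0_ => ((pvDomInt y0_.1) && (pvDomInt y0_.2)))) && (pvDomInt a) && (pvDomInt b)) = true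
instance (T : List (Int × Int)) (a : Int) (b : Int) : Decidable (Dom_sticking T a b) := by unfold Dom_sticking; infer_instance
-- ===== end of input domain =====

-- B replaces A's O(n^2*(b-a)) DP over an n×(b-a+1) matrix by one pass over the sorted list keeping
-- the set of reachable endpoints.  Both versions sort T in place (the proof is about the return value).

-- ===== PORT A =====
-- Python 'x or y' on ints (values here are 0/1)
def pyOrInt (x y : Int) : Int := if x ≠ 0 then x else y

-- first loop of A: 'for i in range(n): if T[i][0] == a: F[i][T[i][1]-T[i][0]] = 1; last = i'
def stick1 (S : List (Int × Int)) (a : Int) (F0 : List (List Int)) :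
    List (List Int) × Option Nat :=
  (List.range S.length).foldl (fun st i =>
      let p := S.getD i (0, 0)
      if p.1 = a then
        (st.1.set i (PySem.List.pySetD (st.1.getD i []) (p.2 - p.1) 1), some i)
      else st)
    (F0, none)

def sticking (T : List (Int × Int)) (a : Int) (b : Int) : Bool :=
  let S := PySem.List.sorted T (fun x => x.1) false          -- T.sort(key=lambda x: x[0])
  let n := S.length
  -- F = [[0]*(b-a+1) for _ in range(n)]   ((b-a+1) < 0 gives [], like Python's [0]*negative)
  let F0 : List (List Int) := (List.range n).map (fun _ => List.replicate (b - a + 1).toNat 0)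
  match stick1 S a F0 with
  | (_, none) => false                                       -- 'if last is None: return False'
  | (F1, some l) =>
    -- 'for i in range(last, n): for j in range(b-a+1): for k in range(i): …'
    let F2 := (List.range' l (n - l)).foldl (fun F i =>
        let p := S.getD i (0, 0)
        (List.range (b - a + 1).toNat).foldl (fun F (j : Nat) =>
          (List.range i).foldl (fun F k =>
            if a + (j : Int) = p.2 then
              F.set i (PySem.List.pySetD (F.getD i []) (j : Int)
                (pyOrInt (PySem.List.pyGetD (F.getD i []) (j : Int) 0)
                         (PySem.List.pyGetD (F.getD k []) ((j : Int) - (p.2 - p.1)) 0)))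
            else F) F) F) F1
    -- 'for i in range(n): if F[i][b-a]: return True'  then 'return False'
    (List.range n).any (fun i => decide (PySem.List.pyGetD (F2.getD i []) (b - a) 0 ≠ 0))

-- ===== PORT B =====
-- guard of B's loop body: '(s == a or s in reached) and a <= e <= b'
def stickGuard (a b : Int) (r : PySem.Set Int) (p : Int × Int) : Bool :=
  (p.1 == a || PySem.Set.contains r p.1) && (decide (a ≤ p.2) && decide (p.2 ≤ b))

-- one iteration of B's loop
def stickStep (a b : Int) (r : PySem.Set Int) (p : Int × Int) : PySem.Set Int :=
  if stickGuard a b r p then PySem.Set.add r p.2 else r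

def sticking_alt (T : List (Int × Int)) (a : Int) (b : Int) : Bool :=
  let S := PySem.List.sorted T (fun x => x.1) false          -- T.sort(key=lambda x: x[0])
  let reached := S.foldl (stickStep a b) PySem.Set.empty
  PySem.Set.contains reached b                               -- 'return b in reached'

-- ===== PRECONDITION & SPEC =====
-- Pre_ excludes only inputs with an interval starting at a on which A raises IndexError (end outside
-- the matrix row) or where A's value comes from Python negative-index wraparound (an interval (a, e)
-- with e < a accidentally marks a spurious cell), and inputs where the DP read F[k][j-d] is out of
-- range (an interval with start > b and end in [a, b], or b < a while some interval starts at a).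
def Pre_sticking (T : List (Int × Int)) (a : Int) (b : Int) : Prop :=
  (∃ p ∈ T, p.1 = a) →
    (a ≤ b ∧ ∀ p ∈ T, (p.1 = a → a ≤ p.2 ∧ p.2 ≤ b) ∧ (p.1 > b → ¬(a ≤ p.2 ∧ p.2 ≤ b)))
instance (T : List (Int × Int)) (a : Int) (b : Int) : Decidable (Pre_sticking T a b) := by
  unfold Pre_sticking; infer_instance

def pvWitness_sticking : (List (Int × Int)) × Int × Int := ([(0, 1), (1, 2), (5, 3)], 0, 2)

def Spec_sticking (T : List (Int × Int)) (a : Int) (b : Int) (out : Bool) : Prop := out = sticking_alt T a b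
instance (T : List (Int × Int)) (a : Int) (b : Int) (out : Bool) : Decidable (Spec_sticking T a b out) := by unfold Spec_sticking; infer_instance

-- ===== CLAIM (what is proved, stated in full; the proofs are below) =====
def Claim_equal_sticking : Prop := ∀ (T : List (Int × Int)) (a : Int) (b : Int), Dom_sticking T a b → Pre_sticking T a b → Spec_sticking T a b (sticking T a b)

-- ===== LEMMAS AND PROOFS =====

-- row of zeros, [0]*(b-a+1)
def zeroRow (a b : Int) : List Int := List.replicate (b - a + 1).toNat 0

-- B's reached-set after the first i intervals of S
def reachS (a b : Int) (S : List (Int × Int)) (i : Nat) : PySem.Set Int :=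
  (S.take i).foldl (stickStep a b) PySem.Set.empty

-- B's guard at position i
def condS (a b : Int) (S : List (Int × Int)) (i : Nat) : Bool :=
  stickGuard a b (reachS a b S i) (S.getD i (0, 0))

-- the row A's loops leave behind at position i (under Pre_)
def finRowS (a b : Int) (S : List (Int × Int)) (i : Nat) : List Int :=
  if condS a b S i then PySem.List.pySetD (zeroRow a b) ((S.getD i (0, 0)).2 - a) 1 else zeroRow a b

-- the row after the first loop
def initRowS (a b : Int) (p : Int × Int) : List Int :=
  if p.1 = a then PySem.List.pySetD (zeroRow a b) (p.2 - p.1) 1 else zeroRow a b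

lemma foldl_id_of {alpha beta : Type} [DecidableEq beta] (L : List beta) (g : alpha → beta → alpha) (F : alpha)
    (hg : ∀ acc j, j ∈ L → g acc j = acc) : L.foldl g F = F := by
  induction L generalizing F with
  | nil => rfl
  | cons x t ih =>
    rw [List.foldl_cons, hg F x (by simp)]
    exact ih F (fun acc j hj => hg acc j (by simp [hj]))

lemma foldl_single {alpha : Type} (L : List Nat) (g : alpha → Nat → alpha) (j0 : Nat) (F : alpha)
    (hg : ∀ acc j, j ∈ L → j ≠ j0 → g acc j = acc) (hc : L.count j0 = 1) :
    L.foldl g F = g F j0 := by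
  induction L generalizing F with
  | nil => simp at hc
  | cons x t ih =>
    by_cases hx : x = j0
    · subst hx
      have ht : t.count x = 0 := by simpa using hc
      have hnot : x ∉ t := by simpa using (List.count_eq_zero.mp ht)
      rw [List.foldl_cons]
      exact foldl_id_of t g (g F x) (fun acc j hj =>
        hg acc j (by simp [hj]) (fun h => hnot (h ▸ hj)))
    · rw [List.foldl_cons, hg F x (by simp) hx]
      exact ih F (fun acc j hj hne => hg acc j (by simp [hj]) hne)
        (by simpa [List.count_cons, hx] using hc)

lemma getD_set_row (F : List (List Int)) (i r : Nat) (row : List Int) :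
    (F.set i row).getD r [] = if r = i ∧ i < F.length then row else F.getD r [] := by
  rw [List.getD_eq_getElem?_getD, List.getD_eq_getElem?_getD, List.getElem?_set]
  by_cases h1 : i = r
  · subst h1
    by_cases h2 : i < F.length <;> simp [h2]
  · have h2 : ¬ r = i := fun h => h1 h.symm
    simp [h1, h2]

lemma pyGetD_zeroRow (a b t : Int) : PySem.List.pyGetD (zeroRow a b) t 0 = 0 := by
  unfold PySem.List.pyGetD
  cases h : PySem.List.pyGet? (zeroRow a b) t with
  | none => rfl
  | some x =>
    have hx := PySem.List.mem_of_pyGet?_eq_some _ h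
    have : x = 0 := List.eq_of_mem_replicate hx
    simp [this]

lemma pyGetD_pySetD_zeroRow (a b x t w : Int) (hx0 : 0 ≤ x) (hx : x < b - a + 1)
    (ht0 : 0 ≤ t) :
    PySem.List.pyGetD (PySem.List.pySetD (zeroRow a b) x w) t 0 = if t = x then w else 0 := by
  rw [PySem.List.pySetD_of_nonneg _ _ hx0]
  unfold PySem.List.pyGetD
  rw [PySem.List.pyGet?_of_nonneg _ ht0]
  rw [List.getElem?_set]
  have hlen : (zeroRow a b).length = (b - a + 1).toNat := by simp [zeroRow]
  by_cases ht : t = x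
  · subst ht
    have h2 : t.toNat < (b - a + 1).toNat := by omega
    simp [hlen, h2]
  · have hne' : ¬ x.toNat = t.toNat := by omega
    rw [if_neg hne', if_neg ht]
    simp only [zeroRow, List.getElem?_replicate]
    split <;> simp

lemma pySetD_zeroRow_zero (a b x : Int) (hx0 : 0 ≤ x) :
    PySem.List.pySetD (zeroRow a b) x 0 = zeroRow a b := by
  rw [PySem.List.pySetD_of_nonneg _ _ hx0]
  exact List.set_replicate_self

lemma pySetD_pySetD_zeroRow (a b x : Int) (u v : Int) (hx0 : 0 ≤ x) :
    PySem.List.pySetD (PySem.List.pySetD (zeroRow a b) x u) x v = PySem.List.pySetD (zeroRow a b) x v := by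
  rw [PySem.List.pySetD_of_nonneg _ _ hx0, PySem.List.pySetD_of_nonneg _ _ hx0,
    PySem.List.pySetD_of_nonneg _ _ hx0]
  exact List.set_set u

lemma reachS_succ (a b : Int) (S : List (Int × Int)) (i : Nat) (h : i < S.length) :
    reachS a b S (i + 1) = stickStep a b (reachS a b S i) (S.getD i (0, 0)) := by
  unfold reachS
  rw [List.take_succ, List.getElem?_eq_getElem h, List.foldl_append]
  simp [List.getD_eq_getElem?_getD, List.getElem?_eq_getElem h]

lemma mem_reachS (a b : Int) (S : List (Int × Int)) (i : Nat) (x : Int) :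
    x ∈ reachS a b S i ↔
      ∃ k, k < i ∧ k < S.length ∧ condS a b S k = true ∧ (S.getD k (0, 0)).2 = x := by
  induction i with
  | zero => simp [reachS]
  | succ i ih =>
    by_cases h : i < S.length
    · rw [reachS_succ a b S i h]
      unfold stickStep
      by_cases hg : stickGuard a b (reachS a b S i) (S.getD i (0, 0)) = true
      · rw [if_pos hg, PySem.Set.mem_add, ih]
        constructor
        · rintro (⟨k, hk1, hk2, hk3, hk4⟩ | hx)
          · exact ⟨k, by omega, hk2, hk3, hk4⟩
          · exact ⟨i, by omega, h, hg, hx.symm⟩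
        · rintro ⟨k, hk1, hk2, hk3, hk4⟩
          by_cases hki : k = i
          · subst hki; exact Or.inr hk4.symm
          · exact Or.inl ⟨k, by omega, hk2, hk3, hk4⟩
      · rw [if_neg hg, ih]
        constructor
        · rintro ⟨k, hk1, hk2, hk3, hk4⟩; exact ⟨k, by omega, hk2, hk3, hk4⟩
        · rintro ⟨k, hk1, hk2, hk3, hk4⟩
          by_cases hki : k = i
          · subst hki; exact absurd hk3 hg
          · exact ⟨k, by omega, hk2, hk3, hk4⟩
    · have he : reachS a b S (i + 1) = reachS a b S i := by
        unfold reachS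
        rw [List.take_of_length_le (by omega), List.take_of_length_le (by omega)]
      rw [he, ih]
      constructor
      · rintro ⟨k, hk1, hk2, hk3, hk4⟩; exact ⟨k, by omega, hk2, hk3, hk4⟩
      · rintro ⟨k, hk1, hk2, hk3, hk4⟩; exact ⟨k, by omega, hk2, hk3, hk4⟩

lemma condS_bounds (a b : Int) (S : List (Int × Int)) (k : Nat)
    (h : condS a b S k = true) : a ≤ (S.getD k (0, 0)).2 ∧ (S.getD k (0, 0)).2 ≤ b := by
  unfold condS stickGuard at h
  simp only [Bool.and_eq_true, decide_eq_true_eq] at h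
  exact h.2

lemma mem_reachS_bounds (a b : Int) (S : List (Int × Int)) (i : Nat) (x : Int)
    (hx : x ∈ reachS a b S i) : a ≤ x ∧ x ≤ b := by
  rcases (mem_reachS a b S i x).mp hx with ⟨k, _, _, hk3, hk4⟩
  exact hk4 ▸ condS_bounds a b S k hk3

lemma getD_F0 (a b : Int) (n r : Nat) :
    ((List.range n).map (fun _ => zeroRow a b)).getD r [] = if r < n then zeroRow a b else [] := by
  rw [List.getD_eq_getElem?_getD, List.getElem?_map]
  by_cases h : r < n
  · simp [List.getElem?_range, h]
  · rw [List.getElem?_eq_none (by simpa using by omega)]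
    simp [h]

-- the fold of A's first loop, cut off after m steps
def stick1Fold (S : List (Int × Int)) (a b : Int) (m : Nat) : List (List Int) × Option Nat :=
  (List.range m).foldl (fun st i =>
      let p := S.getD i (0, 0)
      if p.1 = a then
        (st.1.set i (PySem.List.pySetD (st.1.getD i []) (p.2 - p.1) 1), some i)
      else st)
    ((List.range S.length).map (fun _ => zeroRow a b), none)

lemma stick1_eq_fold (S : List (Int × Int)) (a b : Int) :
    stick1 S a ((List.range S.length).map (fun _ => zeroRow a b)) = stick1Fold S a b S.length := rfl

lemma stick1Fold_succ (S : List (Int × Int)) (a b : Int) (m : Nat) :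
    stick1Fold S a b (m + 1) =
      (if (S.getD m (0, 0)).1 = a then
        ((stick1Fold S a b m).1.set m
          (PySem.List.pySetD ((stick1Fold S a b m).1.getD m [])
            ((S.getD m (0, 0)).2 - (S.getD m (0, 0)).1) 1), some m)
      else stick1Fold S a b m) := by
  unfold stick1Fold
  rw [List.range_succ, List.foldl_append, List.foldl_cons, List.foldl_nil]

lemma stick1Fold_spec (S : List (Int × Int)) (a b : Int) (m : Nat) (hm : m ≤ S.length) :
    (stick1Fold S a b m).1.length = S.length ∧
    (∀ r, (stick1Fold S a b m).1.getD r [] =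
        if r < m then initRowS a b (S.getD r (0, 0))
        else if r < S.length then zeroRow a b else []) ∧
    ((stick1Fold S a b m).2 = none → ∀ i, i < m → (S.getD i (0, 0)).1 ≠ a) ∧
    (∀ l, (stick1Fold S a b m).2 = some l → l < m ∧ (S.getD l (0, 0)).1 = a ∧
        ∀ i, l < i → i < m → (S.getD i (0, 0)).1 ≠ a) := by
  induction m with
  | zero =>
    refine ⟨by simp [stick1Fold], fun r => by simpa [stick1Fold] using getD_F0 a b S.length r,
      fun _ i hi => by omega, fun l hl => by simp [stick1Fold] at hl⟩
  | succ m ih =>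
    obtain ⟨ihlen, ihrows, ihnone, ihsome⟩ := ih (by omega)
    rw [stick1Fold_succ]
    by_cases hp : (S.getD m (0, 0)).1 = a
    · rw [if_pos hp]
      have hmlt : m < S.length := by omega
      refine ⟨by simpa using ihlen, fun r => ?_, by simp, fun l hl => ?_⟩
      · rw [getD_set_row, ihlen]
        by_cases hr : r = m
        · subst hr
          rw [if_pos ⟨rfl, hmlt⟩, if_pos (by omega)]
          rw [ihrows r, if_neg (by omega), if_pos hmlt]
          unfold initRowS
          rw [if_pos hp]
        · rw [if_neg (by simp [hr]), ihrows r]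
          by_cases h2 : r < m
          · have h3 : r < m + 1 := by omega
            rw [if_pos h2, if_pos h3]
          · have h3 : ¬ r < m + 1 := by omega
            rw [if_neg h2, if_neg h3]
      · simp only [Option.some.injEq] at hl
        subst hl
        exact ⟨by omega, hp, fun i h1 h2 => by omega⟩
    · rw [if_neg hp]
      refine ⟨ihlen, fun r => ?_, fun hn i hi => ?_, fun l hl => ?_⟩
      · rw [ihrows r]
        by_cases h2 : r < m
        · have h3 : r < m + 1 := by omega
          rw [if_pos h2, if_pos h3]
        · by_cases h3 : r = m
          · subst h3
            have h4 : r < S.length := by omega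
            have h5 : r < r + 1 := by omega
            rw [if_neg h2, if_pos h5, if_pos h4]
            unfold initRowS
            rw [if_neg hp]
          · have h4 : ¬ r < m + 1 := by omega
            rw [if_neg h2, if_neg h4]
      · by_cases h3 : i = m
        · subst h3; exact hp
        · exact ihnone hn i (by omega)
      · obtain ⟨h1, h2, h3⟩ := ihsome l hl
        exact ⟨by omega, h2, fun i hi1 hi2 => by
          by_cases h4 : i = m
          · subst h4; exact hp
          · exact h3 i hi1 (by omega)⟩

-- first loop of A: rows become initRowS, last is the last index with start = a
lemma stick1_spec (S : List (Int × Int)) (a b : Int) :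
    (stick1 S a ((List.range S.length).map (fun _ => zeroRow a b))).1.length = S.length ∧
    (∀ r, (stick1 S a ((List.range S.length).map (fun _ => zeroRow a b))).1.getD r [] =
        if r < S.length then initRowS a b (S.getD r (0, 0)) else []) ∧
    ((stick1 S a ((List.range S.length).map (fun _ => zeroRow a b))).2 = none →
        ∀ i < S.length, (S.getD i (0, 0)).1 ≠ a) ∧
    (∀ l, (stick1 S a ((List.range S.length).map (fun _ => zeroRow a b))).2 = some l →
        l < S.length ∧ (S.getD l (0, 0)).1 = a ∧
        ∀ i, l < i → i < S.length → (S.getD i (0, 0)).1 ≠ a) := by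
  obtain ⟨h1, h2, h3, h4⟩ := stick1Fold_spec S a b S.length le_rfl
  rw [stick1_eq_fold]
  refine ⟨h1, fun r => ?_, h3, h4⟩
  rw [h2 r]
  by_cases hr : r < S.length
  · rw [if_pos hr, if_pos hr]
  · rw [if_neg hr, if_neg hr, if_neg hr]

-- under Pre_ (on S) and sortedness, the initial row of an unprocessed position r < l equals finRowS
lemma initRow_eq_finRow (a b : Int) (S : List (Int × Int)) (r : Nat)
    (hr : r < S.length) (hra : (S.getD r (0, 0)).1 ≤ a)
    (hpre1 : ∀ p ∈ S, p.1 = a → a ≤ p.2 ∧ p.2 ≤ b) :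
    initRowS a b (S.getD r (0, 0)) = finRowS a b S r := by
  unfold initRowS finRowS
  by_cases hp : (S.getD r (0, 0)).1 = a
  · have hmem : S.getD r (0, 0) ∈ S := by
      rw [List.getD_eq_getElem _ _ hr]
      exact List.getElem_mem hr
    have hb := hpre1 _ hmem hp
    have hcond : condS a b S r = true := by
      unfold condS stickGuard
      simp only [Bool.and_eq_true, Bool.or_eq_true, beq_iff_eq, decide_eq_true_eq]
      exact ⟨Or.inl hp, hb.1, hb.2⟩
    rw [if_pos hp, if_pos hcond, hp]
  · have hx : (S.getD r (0, 0)).1 ∉ reachS a b S r := fun hx =>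
      hp (le_antisymm hra (mem_reachS_bounds a b S r _ hx).1)
    have hcond : ¬ condS a b S r = true := by
      unfold condS stickGuard
      simp only [Bool.and_eq_true, Bool.or_eq_true, beq_iff_eq, decide_eq_true_eq,
        PySem.Set.contains_iff]
      rintro ⟨h1 | h1, -⟩
      · exact hp h1
      · exact hx h1
    rw [if_neg hp, if_neg hcond]

-- predicate: row i0's bit is set after scanning the first m earlier rows
def vval (a b : Int) (S : List (Int × Int)) (i0 m : Nat) : Int :=
  if ((S.getD i0 (0, 0)).1 = a ∨
      ∃ k, k < m ∧ condS a b S k = true ∧ (S.getD k (0, 0)).2 = (S.getD i0 (0, 0)).1) then 1 else 0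

-- the inner k-loop at the single effective column j0 = e - a
lemma kfold_spec (a b : Int) (S : List (Int × Int)) (i0 : Nat) (F : List (List Int)) (m : Nat)
    (hlen : F.length = S.length) (hi0 : i0 < S.length) (hm : m ≤ i0)
    (hsa : a ≤ (S.getD i0 (0, 0)).1)
    (he : a ≤ (S.getD i0 (0, 0)).2 ∧ (S.getD i0 (0, 0)).2 ≤ b)
    (hrows : ∀ r, r < S.length → F.getD r [] =
        if r < i0 then finRowS a b S r else initRowS a b (S.getD r (0, 0))) :
    ((List.range m).foldl (fun F k =>
        F.set i0 (PySem.List.pySetD (F.getD i0 []) ((S.getD i0 (0, 0)).2 - a)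
          (pyOrInt (PySem.List.pyGetD (F.getD i0 []) ((S.getD i0 (0, 0)).2 - a) 0)
                   (PySem.List.pyGetD (F.getD k []) ((S.getD i0 (0, 0)).1 - a) 0)))) F).length
      = S.length ∧
    (∀ r, r ≠ i0 → ((List.range m).foldl (fun F k =>
        F.set i0 (PySem.List.pySetD (F.getD i0 []) ((S.getD i0 (0, 0)).2 - a)
          (pyOrInt (PySem.List.pyGetD (F.getD i0 []) ((S.getD i0 (0, 0)).2 - a) 0)
                   (PySem.List.pyGetD (F.getD k []) ((S.getD i0 (0, 0)).1 - a) 0)))) F).getD r []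
        = F.getD r []) ∧
    ((List.range m).foldl (fun F k =>
        F.set i0 (PySem.List.pySetD (F.getD i0 []) ((S.getD i0 (0, 0)).2 - a)
          (pyOrInt (PySem.List.pyGetD (F.getD i0 []) ((S.getD i0 (0, 0)).2 - a) 0)
                   (PySem.List.pyGetD (F.getD k []) ((S.getD i0 (0, 0)).1 - a) 0)))) F).getD i0 []
        = PySem.List.pySetD (zeroRow a b) ((S.getD i0 (0, 0)).2 - a) (vval a b S i0 m) := by
  induction m with
  | zero =>
    refine ⟨hlen, fun r _ => rfl, ?_⟩
    rw [List.range_zero, List.foldl_nil, hrows i0 hi0, if_neg (by omega)]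
    unfold initRowS vval
    by_cases hs : (S.getD i0 (0, 0)).1 = a
    · rw [if_pos hs, if_pos (Or.inl hs), hs]
    · rw [if_neg hs, if_neg (by rintro (h | ⟨k, hk, -⟩); exact hs h; omega)]
      rw [pySetD_zeroRow_zero a b _ (by omega)]
  | succ m ih =>
    obtain ⟨ihlen, ihrows, ihi0⟩ := ih (by omega)
    rw [List.range_succ, List.foldl_append, List.foldl_cons, List.foldl_nil]
    set G := (List.range m).foldl (fun F k =>
        F.set i0 (PySem.List.pySetD (F.getD i0 []) ((S.getD i0 (0, 0)).2 - a)
          (pyOrInt (PySem.List.pyGetD (F.getD i0 []) ((S.getD i0 (0, 0)).2 - a) 0)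
                   (PySem.List.pyGetD (F.getD k []) ((S.getD i0 (0, 0)).1 - a) 0)))) F with hG
    have hold : PySem.List.pyGetD (G.getD i0 []) ((S.getD i0 (0, 0)).2 - a) 0 = vval a b S i0 m := by
      rw [ihi0, pyGetD_pySetD_zeroRow a b _ _ _ (by omega) (by omega) (by omega), if_pos rfl]
    have hGm : G.getD m [] = finRowS a b S m := by
      rw [ihrows m (by omega), hrows m (by omega), if_pos (by omega)]
    have hrd : PySem.List.pyGetD (G.getD m []) ((S.getD i0 (0, 0)).1 - a) 0 =
        if condS a b S m = true ∧ (S.getD m (0, 0)).2 = (S.getD i0 (0, 0)).1 then 1 else 0 := by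
      rw [hGm]
      unfold finRowS
      by_cases hcm : condS a b S m = true
      · obtain ⟨hc1, hc2⟩ := condS_bounds a b S m hcm
        rw [if_pos hcm, pyGetD_pySetD_zeroRow a b _ _ _ (by omega) (by omega) (by omega)]
        by_cases heq : (S.getD m (0, 0)).2 = (S.getD i0 (0, 0)).1
        · rw [if_pos (by omega), if_pos ⟨hcm, heq⟩]
        · rw [if_neg (by omega), if_neg (by rintro ⟨-, h⟩; exact heq h)]
      · rw [if_neg hcm, pyGetD_zeroRow, if_neg (by rintro ⟨h, -⟩; exact hcm h)]
    have hval : pyOrInt (vval a b S i0 m)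
        (if condS a b S m = true ∧ (S.getD m (0, 0)).2 = (S.getD i0 (0, 0)).1 then 1 else 0) =
        vval a b S i0 (m + 1) := by
      unfold vval
      by_cases hv : ((S.getD i0 (0, 0)).1 = a ∨
          ∃ k, k < m ∧ condS a b S k = true ∧ (S.getD k (0, 0)).2 = (S.getD i0 (0, 0)).1)
      · have hv' : ((S.getD i0 (0, 0)).1 = a ∨
            ∃ k, k < m + 1 ∧ condS a b S k = true ∧ (S.getD k (0, 0)).2 = (S.getD i0 (0, 0)).1) := by
          rcases hv with h | ⟨k, h1, h2, h3⟩
          · exact Or.inl h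
          · exact Or.inr ⟨k, by omega, h2, h3⟩
        rw [if_pos hv, if_pos hv']
        unfold pyOrInt
        rw [if_pos (by omega)]
      · rw [if_neg hv]
        unfold pyOrInt
        rw [if_neg (by omega)]
        by_cases hw : condS a b S m = true ∧ (S.getD m (0, 0)).2 = (S.getD i0 (0, 0)).1
        · rw [if_pos hw, if_pos (Or.inr ⟨m, by omega, hw.1, hw.2⟩)]
        · rw [if_neg hw, if_neg ?_]
          rintro (h | ⟨k, h1, h2, h3⟩)
          · exact hv (Or.inl h)
          · by_cases hk : k = m
            · subst hk; exact hw ⟨h2, h3⟩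
            · exact hv (Or.inr ⟨k, by omega, h2, h3⟩)
    refine ⟨by rw [List.length_set, ihlen], fun r hr => ?_, ?_⟩
    · rw [getD_set_row, if_neg (by simp [hr]), ihrows r hr]
    · rw [getD_set_row, if_pos ⟨rfl, by omega⟩, hold, hrd, hval, ihi0]
      rw [pySetD_pySetD_zeroRow a b _ _ _ (by omega)]

-- one outer iteration of A's triple loop rewrites row i0 to finRowS and keeps the others
lemma body_spec (a b : Int) (S : List (Int × Int)) (i0 : Nat) (F : List (List Int))
    (hlen : F.length = S.length) (hi0 : i0 < S.length)
    (hsa : a ≤ (S.getD i0 (0, 0)).1)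
    (hpre1 : ∀ p ∈ S, p.1 = a → a ≤ p.2 ∧ p.2 ≤ b)
    (hpre2 : ∀ p ∈ S, p.1 > b → ¬(a ≤ p.2 ∧ p.2 ≤ b))
    (hrows : ∀ r, r < S.length → F.getD r [] =
        if r < i0 then finRowS a b S r else initRowS a b (S.getD r (0, 0))) :
    ((List.range (b - a + 1).toNat).foldl (fun F (j : Nat) =>
        (List.range i0).foldl (fun F k =>
          if a + (j : Int) = (S.getD i0 (0, 0)).2 then
            F.set i0 (PySem.List.pySetD (F.getD i0 []) (j : Int)
              (pyOrInt (PySem.List.pyGetD (F.getD i0 []) (j : Int) 0)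
                       (PySem.List.pyGetD (F.getD k []) ((j : Int) - ((S.getD i0 (0, 0)).2 - (S.getD i0 (0, 0)).1)) 0)))
          else F) F) F).length = S.length ∧
    ∀ r, r < S.length →
      ((List.range (b - a + 1).toNat).foldl (fun F (j : Nat) =>
        (List.range i0).foldl (fun F k =>
          if a + (j : Int) = (S.getD i0 (0, 0)).2 then
            F.set i0 (PySem.List.pySetD (F.getD i0 []) (j : Int)
              (pyOrInt (PySem.List.pyGetD (F.getD i0 []) (j : Int) 0)
                       (PySem.List.pyGetD (F.getD k []) ((j : Int) - ((S.getD i0 (0, 0)).2 - (S.getD i0 (0, 0)).1)) 0)))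
          else F) F) F).getD r [] =
        if r < i0 + 1 then finRowS a b S r else initRowS a b (S.getD r (0, 0)) := by
  have hmem : S.getD i0 (0, 0) ∈ S := by
    rw [List.getD_eq_getElem _ _ hi0]
    exact List.getElem_mem hi0
  by_cases he : a ≤ (S.getD i0 (0, 0)).2 ∧ (S.getD i0 (0, 0)).2 ≤ b
  · -- the column j0 = e - a is hit exactly once; all other columns change nothing
    have hj0 : ((S.getD i0 (0, 0)).2 - a).toNat < (b - a + 1).toNat := by omega
    have hj0' : ((((S.getD i0 (0, 0)).2 - a).toNat : Nat) : Int) = (S.getD i0 (0, 0)).2 - a := by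
      omega
    have hone : (List.range (b - a + 1).toNat).foldl (fun F (j : Nat) =>
        (List.range i0).foldl (fun F k =>
          if a + (j : Int) = (S.getD i0 (0, 0)).2 then
            F.set i0 (PySem.List.pySetD (F.getD i0 []) (j : Int)
              (pyOrInt (PySem.List.pyGetD (F.getD i0 []) (j : Int) 0)
                       (PySem.List.pyGetD (F.getD k []) ((j : Int) - ((S.getD i0 (0, 0)).2 - (S.getD i0 (0, 0)).1)) 0)))
          else F) F) F =
        (List.range i0).foldl (fun F k =>
          F.set i0 (PySem.List.pySetD (F.getD i0 []) ((S.getD i0 (0, 0)).2 - a)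
            (pyOrInt (PySem.List.pyGetD (F.getD i0 []) ((S.getD i0 (0, 0)).2 - a) 0)
                     (PySem.List.pyGetD (F.getD k []) ((S.getD i0 (0, 0)).1 - a) 0)))) F := by
      have hguard : ∀ (acc : List (List Int)) (j : Nat), j ∈ List.range (b - a + 1).toNat →
          j ≠ ((S.getD i0 (0, 0)).2 - a).toNat →
          (List.range i0).foldl (fun F k =>
            if a + (j : Int) = (S.getD i0 (0, 0)).2 then
              F.set i0 (PySem.List.pySetD (F.getD i0 []) (j : Int)
                (pyOrInt (PySem.List.pyGetD (F.getD i0 []) (j : Int) 0)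
                         (PySem.List.pyGetD (F.getD k []) ((j : Int) - ((S.getD i0 (0, 0)).2 - (S.getD i0 (0, 0)).1)) 0)))
            else F) acc = acc := by
        intro acc j hj hne
        apply foldl_id_of
        intro acc2 k _
        rw [if_neg ?_]
        intro hEq
        exact hne (by omega)
      have hcount : (List.range (b - a + 1).toNat).count (((S.getD i0 (0, 0)).2 - a).toNat) = 1 := by
        rw [List.count_range, if_pos hj0]
      refine Eq.trans (foldl_single _ _ (((S.getD i0 (0, 0)).2 - a).toNat) F hguard hcount) ?_
      apply PySem.List.foldl_congr_mem
      intro acc k _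
      rw [if_pos (by omega)]
      have h1 : ((((S.getD i0 (0, 0)).2 - a).toNat : Nat) : Int) -
          ((S.getD i0 (0, 0)).2 - (S.getD i0 (0, 0)).1) = (S.getD i0 (0, 0)).1 - a := by omega
      rw [h1, hj0']
    obtain ⟨klen, krows, ki0⟩ := kfold_spec a b S i0 F i0 hlen hi0 le_rfl hsa he hrows
    rw [hone]
    refine ⟨klen, ?_⟩
    intro r hr
    by_cases hri : r = i0
    · subst hri
      rw [ki0, if_pos (by omega)]
      have hpred : ((S.getD r (0, 0)).1 = a ∨
          ∃ k, k < r ∧ condS a b S k = true ∧ (S.getD k (0, 0)).2 = (S.getD r (0, 0)).1) ↔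
          condS a b S r = true := by
        rw [show condS a b S r = stickGuard a b (reachS a b S r) (S.getD r (0, 0)) from rfl]
        unfold stickGuard
        simp only [Bool.and_eq_true, Bool.or_eq_true, beq_iff_eq, decide_eq_true_eq,
          PySem.Set.contains_iff, mem_reachS]
        constructor
        · rintro (h | ⟨k, h1, h2, h3⟩)
          · exact ⟨Or.inl h, he.1, he.2⟩
          · exact ⟨Or.inr ⟨k, h1, by omega, h2, h3⟩, he.1, he.2⟩
        · rintro ⟨h | ⟨k, h1, h2, h3, h4⟩, -⟩
          · exact Or.inl h
          · exact Or.inr ⟨k, h1, h3, h4⟩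
      unfold vval finRowS
      by_cases hp : ((S.getD r (0, 0)).1 = a ∨
          ∃ k, k < r ∧ condS a b S k = true ∧ (S.getD k (0, 0)).2 = (S.getD r (0, 0)).1)
      · rw [if_pos hp, if_pos (hpred.mp hp)]
      · rw [if_neg hp, if_neg (fun h => hp (hpred.mpr h)), pySetD_zeroRow_zero a b _ (by omega)]
    · rw [krows r hri, hrows r hr]
      by_cases h2 : r < i0
      · rw [if_pos h2, if_pos (by omega)]
      · rw [if_neg h2, if_neg (by omega)]
  · -- e outside [a, b]: no column is ever hit, the row keeps its (zero) initial form
    have hid : (List.range (b - a + 1).toNat).foldl (fun F (j : Nat) =>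
        (List.range i0).foldl (fun F k =>
          if a + (j : Int) = (S.getD i0 (0, 0)).2 then
            F.set i0 (PySem.List.pySetD (F.getD i0 []) (j : Int)
              (pyOrInt (PySem.List.pyGetD (F.getD i0 []) (j : Int) 0)
                       (PySem.List.pyGetD (F.getD k []) ((j : Int) - ((S.getD i0 (0, 0)).2 - (S.getD i0 (0, 0)).1)) 0)))
          else F) F) F = F := by
      apply foldl_id_of
      intro acc j hj
      apply foldl_id_of
      intro acc2 k _
      rw [if_neg ?_]
      intro hEq
      have hjM := List.mem_range.mp hj
      exact he ⟨by omega, by omega⟩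
    rw [hid]
    refine ⟨hlen, ?_⟩
    intro r hr
    rw [hrows r hr]
    by_cases h2 : r < i0
    · rw [if_pos h2, if_pos (by omega)]
    · by_cases h3 : r = i0
      · subst h3
        rw [if_neg h2, if_pos (by omega)]
        have hsne : (S.getD r (0, 0)).1 ≠ a := fun h => he (hpre1 _ hmem h)
        have hcond : ¬ condS a b S r = true := by
          unfold condS stickGuard
          simp only [Bool.and_eq_true, Bool.or_eq_true, beq_iff_eq, decide_eq_true_eq]
          rintro ⟨-, h2', h3'⟩
          exact he ⟨h2', h3'⟩
        unfold initRowS finRowS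
        rw [if_neg hsne, if_neg hcond]
      · rw [if_neg h2, if_neg (by omega)]

-- A's outer loop turns every row into finRowS
lemma loop2_spec (a b : Int) (S : List (Int × Int)) (c i0 : Nat) (F : List (List Int))
    (hlen : F.length = S.length) (hc : i0 + c = S.length)
    (hsorted : ∀ k i : Nat, k ≤ i → (hi : i < S.length) → (S.getD k (0, 0)).1 ≤ (S.getD i (0, 0)).1)
    (hsa : ∀ i, i0 ≤ i → i < S.length → a ≤ (S.getD i (0, 0)).1)
    (hpre1 : ∀ p ∈ S, p.1 = a → a ≤ p.2 ∧ p.2 ≤ b)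
    (hpre2 : ∀ p ∈ S, p.1 > b → ¬(a ≤ p.2 ∧ p.2 ≤ b))
    (hrows : ∀ r, r < S.length → F.getD r [] =
        if r < i0 then finRowS a b S r else initRowS a b (S.getD r (0, 0))) :
    ∀ r, r < S.length →
      ((List.range' i0 c).foldl (fun F i =>
        let p := S.getD i (0, 0)
        (List.range (b - a + 1).toNat).foldl (fun F (j : Nat) =>
          (List.range i).foldl (fun F k =>
            if a + (j : Int) = p.2 then
              F.set i (PySem.List.pySetD (F.getD i []) (j : Int)
                (pyOrInt (PySem.List.pyGetD (F.getD i []) (j : Int) 0)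
                         (PySem.List.pyGetD (F.getD k []) ((j : Int) - (p.2 - p.1)) 0)))
            else F) F) F) F).getD r [] = finRowS a b S r := by
  induction c generalizing i0 F with
  | zero =>
    intro r hr
    rw [show List.range' i0 0 = [] from rfl, List.foldl_nil, hrows r hr, if_pos (by omega)]
  | succ c ih =>
    have hi0 : i0 < S.length := by omega
    obtain ⟨blen, brows⟩ :=
      body_spec a b S i0 F hlen hi0 (hsa i0 le_rfl hi0) hpre1 hpre2 hrows
    intro r hr
    rw [List.range'_succ, List.foldl_cons]
    exact ih (i0 + 1) _ blen (by omega) (fun i h1 h2 => hsa i (by omega) h2) brows r hr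

-- ===== VERDICT (by name: the statement is the Claim_ definition above) =====
theorem sticking_spec : Claim_equal_sticking := by
  unfold Claim_equal_sticking
  intro T a b _ hpre
  unfold Spec_sticking sticking sticking_alt
  dsimp only
  simp only [show (List.replicate (b - a + 1).toNat (0 : Int)) = zeroRow a b from rfl]
  obtain ⟨h1len, h1rows, h1none, h1some⟩ :=
    stick1_spec (PySem.List.sorted T (fun x => x.1) false) a b
  have hmemS : ∀ p, p ∈ PySem.List.sorted T (fun x => x.1) false ↔ p ∈ T := fun p =>
    PySem.List.mem_sorted T (fun x => x.1) false p
  rcases hst : stick1 (PySem.List.sorted T (fun x => x.1) false) a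
      ((List.range (PySem.List.sorted T (fun x => x.1) false).length).map
        (fun _ => zeroRow a b)) with ⟨F1, last⟩
  rw [hst] at h1len h1rows h1none h1some
  dsimp only at h1len h1rows h1none h1some ⊢
  set S := PySem.List.sorted T (fun x => x.1) false with hS
  cases last with
  | none =>
    dsimp only at h1len h1rows h1none h1some ⊢
    have hnone := h1none rfl
    have hcond : ∀ k, k < S.length → condS a b S k ≠ true := by
      intro k
      induction k using Nat.strong_induction_on with
      | _ k ihk =>
        intro hk hc
        rw [show condS a b S k = stickGuard a b (reachS a b S k) (S.getD k (0, 0)) from rfl] at hc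
        unfold stickGuard at hc
        simp only [Bool.and_eq_true, Bool.or_eq_true, beq_iff_eq, decide_eq_true_eq,
          PySem.Set.contains_iff] at hc
        rcases hc.1 with h | h
        · exact hnone k hk h
        · rcases (mem_reachS a b S k _).mp h with ⟨k', hk1, hk2, hk3, -⟩
          exact ihk k' hk1 hk2 hk3
    have hfalse : PySem.Set.contains (S.foldl (stickStep a b) PySem.Set.empty) b = false := by
      rw [← Bool.not_eq_true, PySem.Set.contains_iff]
      intro hb
      have hb' : b ∈ reachS a b S S.length := by
        unfold reachS
        rw [List.take_length]
        exact hb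
      rcases (mem_reachS a b S S.length b).mp hb' with ⟨k, -, h2, h3, -⟩
      exact hcond k h2 h3
    rw [hfalse]
  | some l =>
    dsimp only at h1len h1rows h1none h1some ⊢
    obtain ⟨hl1, hl2, -⟩ := h1some l rfl
    have hmem_l : S.getD l (0, 0) ∈ S := by
      rw [List.getD_eq_getElem _ _ hl1]
      exact List.getElem_mem hl1
    obtain ⟨hab, hTcl⟩ := hpre ⟨_, (hmemS _).mp hmem_l, hl2⟩
    have hpre1 : ∀ p ∈ S, p.1 = a → a ≤ p.2 ∧ p.2 ≤ b := fun p hp =>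
      (hTcl p ((hmemS p).mp hp)).1
    have hpre2 : ∀ p ∈ S, p.1 > b → ¬(a ≤ p.2 ∧ p.2 ≤ b) := fun p hp =>
      (hTcl p ((hmemS p).mp hp)).2
    have hpair : S.Pairwise (fun p q => p.1 ≤ q.1) :=
      PySem.List.sorted_pairwise T (fun x => x.1)
    have hsorted : ∀ k i : Nat, k ≤ i → i < S.length →
        (S.getD k (0, 0)).1 ≤ (S.getD i (0, 0)).1 := by
      intro k i hki hi
      rcases Nat.eq_or_lt_of_le hki with rfl | hlt
      · exact le_refl _
      · have h := List.pairwise_iff_getElem.mp hpair k i (by omega) hi hlt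
        rw [List.getD_eq_getElem _ _ (by omega), List.getD_eq_getElem _ _ hi]
        exact h
    have hsa : ∀ i, l ≤ i → i < S.length → a ≤ (S.getD i (0, 0)).1 := fun i h1 h2 =>
      hl2 ▸ hsorted l i h1 h2
    have hrowsF1 : ∀ r, r < S.length → F1.getD r [] =
        if r < l then finRowS a b S r else initRowS a b (S.getD r (0, 0)) := by
      intro r hr
      rw [h1rows r, if_pos hr]
      by_cases h2 : r < l
      · rw [if_pos h2]
        exact initRow_eq_finRow a b S r hr (hl2 ▸ hsorted r l (by omega) hl1) hpre1
      · rw [if_neg h2]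
    have hloop := loop2_spec a b S (S.length - l) l F1 h1len (by omega) hsorted hsa
      hpre1 hpre2 hrowsF1
    rw [Bool.eq_iff_iff, List.any_eq_true]
    constructor
    · rintro ⟨i, hi, hdec⟩
      have hiN := List.mem_range.mp hi
      rw [hloop i hiN] at hdec
      simp only [decide_eq_true_eq] at hdec
      unfold finRowS at hdec
      by_cases hc : condS a b S i = true
      · rw [if_pos hc] at hdec
        obtain ⟨hc1, hc2⟩ := condS_bounds a b S i hc
        rw [pyGetD_pySetD_zeroRow a b _ _ _ (by omega) (by omega) (by omega)] at hdec
        have heb : (S.getD i (0, 0)).2 = b := by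
          by_contra hne
          rw [if_neg (by omega)] at hdec
          exact hdec rfl
        rw [PySem.Set.contains_iff]
        have hb' : b ∈ reachS a b S S.length :=
          (mem_reachS a b S S.length b).mpr ⟨i, hiN, hiN, hc, heb⟩
        unfold reachS at hb'
        rw [List.take_length] at hb'
        exact hb'
      · rw [if_neg hc, pyGetD_zeroRow] at hdec
        exact absurd rfl hdec
    · intro hcont
      rw [PySem.Set.contains_iff] at hcont
      have hb' : b ∈ reachS a b S S.length := by
        unfold reachS
        rw [List.take_length]
        exact hcont
      rcases (mem_reachS a b S S.length b).mp hb' with ⟨k, -, hk2, hk3, hk4⟩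
      refine ⟨k, List.mem_range.mpr hk2, ?_⟩
      rw [hloop k hk2]
      simp only [decide_eq_true_eq]
      unfold finRowS
      rw [if_pos hk3]
      obtain ⟨hc1, hc2⟩ := condS_bounds a b S k hk3
      rw [pyGetD_pySetD_zeroRow a b _ _ _ (by omega) (by omega) (by omega)]
      rw [if_pos (by omega)]
      omega
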